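-- pv_equiv track=rewrite | github.com/flatironinstitute/ExEnDiff | src/models/operator/operator_util.py | filter_short_structures
-- ===== SOURCE A (Python) =====
-- def filter_short_structures(S, min_length=3):
--     N = len(S)
--     i = 0
--     while i < N:
--         current = S[i]
--         if current in ['H', 'E']:
--             start = i
--             while i < N and S[i] == current:
--                 i += 1
--             length = i - start
--             if length < min_length:
--                 # Convert to coil
--                 for j in range(start, i):
--                     S[j] = 'C'
--         else:
--             i += 1
--     return S
-- ===== SOURCE B (Python) =====
-- def filter_short_structures(S, min_length=3):
--     # Run-length encode the sequence in one pass, then expand the runs,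
--     # replacing short H/E runs by coil.  Returns a new list (does not
--     # mutate S in place as A does); the return value is identical.
--     runs = []
--     for x in S:
--         if runs and runs[-1][0] == x:
--             runs[-1][1] += 1
--         else:
--             runs.append([x, 1])
--     out = []
--     for x, n in runs:
--         if x in ('H', 'E') and n < min_length:
--             out += ['C'] * n
--         else:
--             out += [x] * n
--     return out
-- ===== Notes on version B (the rewrite author's own statement) =====
-- stated objective: alternative
-- what changed: A rewrites short H/E runs in place with an index-advancing while/while/for over positions; B run-length-encodes the sequence in one forward pass and then expands the runs into a new list, emitting ['C']*n for short H/E runs (B does not mutate S; the return value is identical).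
import Mathlib
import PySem

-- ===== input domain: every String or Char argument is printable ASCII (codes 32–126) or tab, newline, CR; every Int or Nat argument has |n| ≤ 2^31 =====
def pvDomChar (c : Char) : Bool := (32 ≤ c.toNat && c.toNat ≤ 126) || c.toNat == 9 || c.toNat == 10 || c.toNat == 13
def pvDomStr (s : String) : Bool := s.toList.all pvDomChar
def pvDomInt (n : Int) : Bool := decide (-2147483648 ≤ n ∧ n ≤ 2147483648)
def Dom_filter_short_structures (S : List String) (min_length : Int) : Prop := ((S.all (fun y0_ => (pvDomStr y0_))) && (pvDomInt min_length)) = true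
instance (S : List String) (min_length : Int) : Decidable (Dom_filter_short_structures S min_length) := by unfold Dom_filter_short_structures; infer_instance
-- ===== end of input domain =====

-- B replaces A's in-place index-scanning rewrite by a run-length-encode-then-expand
-- pass that builds a NEW list (A mutates S in place and returns it; the proved
-- equivalence is about the return value only). Objective: alternative decomposition.

-- ===== PORT A =====
-- inner 'while i < N and S[i] == current: i += 1' (returns the final i)
def scanRun (S : List String) (current : String) (N i : Nat) : Nat :=
  if i < N ∧ S.getD i "" == current then scanRun S current N (i + 1) else i
  termination_by N - i
  decreasing_by omega

-- needed by loopA's termination: the inner while advances at least one step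
theorem scanRun_ge (S : List String) (current : String) (N : Nat) :
    ∀ i, i ≤ scanRun S current N i := by
  intro i
  fun_induction scanRun S current N i with
  | case1 i h ih => omega
  | case2 i h => omega

theorem scanRun_gt (S : List String) (current : String) (N i : Nat)
    (h1 : i < N) (h2 : S.getD i "" == current) :
    i < scanRun S current N i := by
  rw [scanRun]
  simp only [h1, h2, and_self, if_pos]
  have := scanRun_ge S current N (i + 1)
  omega

-- 'for j in range(start, i): S[j] = "C"'  (hand-ported, exact: sets indices k..stop-1)
def convertRun (S : List String) (k stop : Nat) : List String :=
  if k < stop then convertRun (S.set k "C") (k + 1) stop else S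
  termination_by stop - k
  decreasing_by omega

-- the outer 'while i < N' loop, carrying the (possibly mutated) list
def loopA (N : Nat) (ml : Int) (S : List String) (i : Nat) : List String :=
  if i < N then
    if S.getD i "" == "H" || S.getD i "" == "E" then
      loopA N ml
        (if ((scanRun S (S.getD i "") N i : Int) - (i : Int)) < ml
          then convertRun S i (scanRun S (S.getD i "") N i) else S)
        (scanRun S (S.getD i "") N i)
    else
      loopA N ml S (i + 1)
  else S
  termination_by N - i
  decreasing_by
  · have := scanRun_gt S (S.getD i "") N i (by omega) (by simp)
    omega
  · omega

def filter_short_structures (S : List String) (min_length : Int) : List String :=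
  loopA S.length min_length S 0

-- ===== PORT B =====
-- 'if runs and runs[-1][0] == x: runs[-1][1] += 1 else: runs.append([x, 1])'
def bStep (runs : List (String × Int)) (x : String) : List (String × Int) :=
  match runs.getLast? with
  | some (y, n) => if y == x then runs.dropLast ++ [(y, n + 1)] else runs ++ [(x, 1)]
  | none => [(x, 1)]

-- the chunk appended for one run: ['C']*n or [x]*n
def bChunk (ml : Int) (p : String × Int) : List String :=
  if (p.1 == "H" || p.1 == "E") && p.2 < ml then List.replicate p.2.toNat "C"
  else List.replicate p.2.toNat p.1

def filter_short_structures_alt (S : List String) (min_length : Int) : List String :=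
  (S.foldl bStep []).foldl (fun out p => out ++ bChunk min_length p) []

-- ===== PRECONDITION & SPEC =====
def Spec_filter_short_structures (S : List String) (min_length : Int) (out : List String) : Prop := out = filter_short_structures_alt S min_length
instance (S : List String) (min_length : Int) (out : List String) : Decidable (Spec_filter_short_structures S min_length out) := by unfold Spec_filter_short_structures; infer_instance

-- ===== CLAIM (what is proved, stated in full; the proofs are below) =====
def Claim_equal_filter_short_structures : Prop := ∀ (S : List String) (min_length : Int), Dom_filter_short_structures S min_length → Spec_filter_short_structures S min_length (filter_short_structures S min_length)

-- ===== LEMMAS AND PROOFS =====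

-- canonical run-by-run processing of the sequence (proof intermediary)
def proc (ml : Int) : List String → List String
  | [] => []
  | x :: xs =>
    if x == "H" || x == "E" then
      (if (1 + ((xs.takeWhile (fun y => y == x)).length : Int)) < ml
        then List.replicate (1 + (xs.takeWhile (fun y => y == x)).length) "C"
        else x :: xs.takeWhile (fun y => y == x))
        ++ proc ml (xs.dropWhile (fun y => y == x))
    else x :: proc ml xs
  termination_by l => l.length
  decreasing_by
  · have := List.length_dropWhile_le (fun y => y == x) xs
    simp; omega
  · simp

-- run-length encoding (proof intermediary)
def rle : List String → List (String × Int)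
  | [] => []
  | x :: xs =>
      (x, (1 : Int) + (xs.takeWhile (fun y => y == x)).length) :: rle (xs.dropWhile (fun y => y == x))
  termination_by l => l.length
  decreasing_by
  have := List.length_dropWhile_le (fun y => y == x) xs
  simp; omega

theorem takeWhile_eq_replicate (x : String) (xs : List String) :
    xs.takeWhile (fun y => y == x) = List.replicate (xs.takeWhile (fun y => y == x)).length x := by
  induction xs with
  | nil => simp
  | cons a t ih =>
    by_cases h : (a == x) = true
    · have hax : a = x := by simpa using h
      rw [List.takeWhile_cons, if_pos h, List.length_cons, List.replicate_succ, hax, ← ih]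
    · rw [List.takeWhile_cons, if_neg h]
      simp

theorem head?_dropWhile_ne (x : String) (xs : List String) :
    ∀ a, (xs.dropWhile (fun y => y == x)).head? = some a → ¬ (a == x) = true := by
  induction xs with
  | nil => simp
  | cons b t ih =>
    intro a ha
    rw [List.dropWhile_cons] at ha
    by_cases h : (b == x) = true
    · rw [if_pos h] at ha
      exact ih a ha
    · rw [if_neg h] at ha
      simp at ha
      subst ha
      simpa using h

-- ---------- A side ----------

theorem scanRun_eq (S : List String) (c : String) (i : Nat) (h : i ≤ S.length) :
    scanRun S c S.length i = i + ((S.drop i).takeWhile (fun y => y == c)).length := by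
  fun_induction scanRun S c S.length i with
  | case1 i hcond ih =>
    have hi : i < S.length := hcond.1
    have hd : S.drop i = S[i] :: S.drop (i + 1) := List.drop_eq_getElem_cons hi
    have hget : S.getD i "" = S[i] := by
      simp [List.getD_eq_getElem?_getD, List.getElem?_eq_getElem hi]
    rw [ih (by omega), hd, List.takeWhile_cons]
    have : (S[i] == c) = true := by rw [← hget]; exact hcond.2
    simp [this]
    omega
  | case2 i hcond =>
    rcases Nat.lt_or_ge i S.length with hi | hi
    · have hget : S.getD i "" = S[i] := by
        simp [List.getD_eq_getElem?_getD, List.getElem?_eq_getElem hi]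
      have hne : ¬ (S[i] == c) = true := by
        intro hk; exact hcond ⟨hi, by rw [hget]; exact hk⟩
      have hd : S.drop i = S[i] :: S.drop (i + 1) := List.drop_eq_getElem_cons hi
      rw [hd, List.takeWhile_cons]
      simp [hne]
    · have : S.drop i = [] := List.drop_eq_nil_of_le hi
      simp [this]

theorem convertRun_length (S : List String) (k stop : Nat) :
    (convertRun S k stop).length = S.length := by
  fun_induction convertRun S k stop with
  | case1 S k h ih => simpa using ih
  | case2 S k h => rfl

theorem convertRun_eq (S : List String) (k stop : Nat) (hk : stop ≤ S.length) (hks : k ≤ stop) :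
    convertRun S k stop = S.take k ++ List.replicate (stop - k) "C" ++ S.drop stop := by
  fun_induction convertRun S k stop with
  | case1 S k h ih =>
    have hkl : k < S.length := by omega
    have hlen : (S.take k).length = k := by simp; omega
    have hset : S.set k "C" = S.take k ++ "C" :: S.drop (k + 1) :=
      List.set_eq_take_cons_drop "C" hkl
    have h1 : k + 1 - k = 1 := by omega
    have h2 : stop - k = (stop - (k + 1)) + 1 := by omega
    have A1 : List.take (k + 1) (S.take k ++ "C" :: S.drop (k + 1)) = S.take k ++ ["C"] := by
      rw [List.take_append]
      all_goals simp [hlen, h1]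
    have A2 : List.drop stop (S.take k ++ "C" :: S.drop (k + 1)) = S.drop stop := by
      rw [List.drop_append, List.drop_eq_nil_of_le (by simp; omega), hlen, h2]
      rw [List.drop_succ_cons, List.drop_drop, List.nil_append]
      congr 1
      omega
    rw [ih (by simpa using hk) (by omega), hset, A1, A2, h2, List.replicate_succ]
    simp [List.append_assoc]
  | case2 S k h =>
    have hks' : k = stop := by omega
    subst hks'
    simp [List.take_append_drop]

theorem loopA_eq (ml : Int) :
    ∀ (fuel i : Nat) (S : List String), S.length - i ≤ fuel →
      loopA S.length ml S i = S.take i ++ proc ml (S.drop i) := by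
  intro fuel
  induction fuel with
  | zero =>
    intro i S hf
    rw [loopA, if_neg (by omega)]
    rw [List.take_of_length_le (by omega), List.drop_eq_nil_of_le (by omega)]
    simp [proc]
  | succ fuel ih =>
    intro i S hf
    by_cases hiN : i < S.length
    · have hget : S.getD i "" = S[i] := by
        simp [List.getD_eq_getElem?_getD, List.getElem?_eq_getElem hiN]
      have hd : S.drop i = S[i] :: S.drop (i + 1) := List.drop_eq_getElem_cons hiN
      rw [loopA, if_pos hiN, hget]
      by_cases hc : (S[i] == "H" || S[i] == "E") = true
      · rw [if_pos hc]
        have htw : (S.drop i).takeWhile (fun y => y == S[i])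
            = S[i] :: (S.drop (i + 1)).takeWhile (fun y => y == S[i]) := by
          rw [hd, List.takeWhile_cons]
          simp
        have hdw : (S.drop i).dropWhile (fun y => y == S[i])
            = (S.drop (i + 1)).dropWhile (fun y => y == S[i]) := by
          rw [hd, List.dropWhile_cons]
          simp
        set t := ((S.drop i).takeWhile (fun y => y == S[i])).length with htdef
        have hje : scanRun S S[i] S.length i = i + t := scanRun_eq S S[i] i (by omega)
        have ht1 : 1 ≤ t := by rw [htdef, htw]; simp
        have htle : t ≤ S.length - i := by
          have := (List.takeWhile_prefix (l := S.drop i) (fun y => y == S[i])).length_le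
          simp at this
          omega
        have hrest : (S.drop i).dropWhile (fun y => y == S[i]) = S.drop (i + t) := by
          have hsplit := List.takeWhile_append_dropWhile
            (p := fun y => y == S[i]) (l := S.drop i)
          have := List.drop_left' (l₂ := (S.drop i).dropWhile (fun y => y == S[i]))
            (i := t) htdef.symm
          rw [hsplit] at this
          rw [← this, List.drop_drop]
        have htake : (S.drop i).takeWhile (fun y => y == S[i]) = (S.drop i).take t :=
          List.prefix_iff_eq_take.mp (List.takeWhile_prefix _)
        have hproc : proc ml (S.drop i)
            = (if (1 + (((S.drop (i+1)).takeWhile (fun y => y == S[i])).length : Int)) < ml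
                then List.replicate (1 + ((S.drop (i+1)).takeWhile (fun y => y == S[i])).length) "C"
                else S[i] :: (S.drop (i+1)).takeWhile (fun y => y == S[i]))
              ++ proc ml ((S.drop (i+1)).dropWhile (fun y => y == S[i])) := by
          rw [hd, proc, if_pos hc]
        have htlen : t = 1 + ((S.drop (i+1)).takeWhile (fun y => y == S[i])).length := by
          rw [htdef, htw]; simp; omega
        have hcast : ((i + t : Nat) : Int) - (i : Int)
            = (1 + (((S.drop (i+1)).takeWhile (fun y => y == S[i])).length : Int)) := by
          rw [htlen]
          push_cast
          ring
        rw [hje]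
        by_cases hml : ((i + t : Nat) : Int) - (i : Int) < ml
        · rw [if_pos hml]
          have hS' : convertRun S i (i + t) =
              (S.take i ++ List.replicate t "C") ++ S.drop (i + t) := by
            rw [convertRun_eq S i (i + t) (by omega) (by omega)]
            simp [List.append_assoc]
          have hlen' : (convertRun S i (i + t)).length = S.length := convertRun_length S i (i + t)
          rw [show S.length = (convertRun S i (i + t)).length from hlen'.symm]
          rw [ih (i + t) (convertRun S i (i + t)) (by rw [hlen']; omega)]
          rw [hS']
          rw [List.take_left' (by simp; omega), List.drop_left' (by simp; omega)]
          rw [hproc]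
          have hcml : (1 + (((S.drop (i+1)).takeWhile (fun y => y == S[i])).length : Int)) < ml := by
            rw [← hcast]; exact hml
          rw [if_pos hcml]
          rw [← hdw, hrest]
          rw [show (1 + ((S.drop (i+1)).takeWhile (fun y => y == S[i])).length) = t from htlen.symm]
          simp [List.append_assoc]
        · rw [if_neg hml]
          rw [ih (i + t) S (by omega)]
          rw [hproc]
          have hcml : ¬ (1 + (((S.drop (i+1)).takeWhile (fun y => y == S[i])).length : Int)) < ml := by
            rw [← hcast]; exact hml
          rw [if_neg hcml]
          rw [← hdw, hrest]
          rw [List.take_add, ← htake, htw]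
          simp [List.append_assoc]
      · rw [if_neg hc]
        rw [ih (i + 1) S (by omega)]
        have hproc : proc ml (S.drop i) = S[i] :: proc ml (S.drop (i + 1)) := by
          rw [hd, proc, if_neg hc]
        have htk : List.take (i + 1) S = List.take i S ++ [S[i]] := by
          rw [List.take_add_one]
          simp [List.getElem?_eq_getElem hiN]
        rw [hproc, htk]
        simp only [List.append_assoc, List.singleton_append]
    · rw [loopA, if_neg (by omega)]
      rw [List.take_of_length_le (by omega), List.drop_eq_nil_of_le (by omega)]
      simp [proc]

-- ---------- B side ----------

theorem bStep_concat (acc : List (String × Int)) (y : String) (n : Int) (x : String) :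
    bStep (acc ++ [(y, n)]) x =
      if y == x then acc ++ [(y, n + 1)] else (acc ++ [(y, n)]) ++ [(x, 1)] := by
  simp [bStep]

theorem bStep_absorb (rest : List String) (y : String) :
    ∀ (k : Nat) (acc : List (String × Int)) (n : Int),
      List.foldl bStep (acc ++ [(y, n)]) (List.replicate k y ++ rest) =
      List.foldl bStep (acc ++ [(y, n + k)]) rest := by
  intro k
  induction k with
  | zero => intro acc n; simp
  | succ k ih =>
    intro acc n
    rw [List.replicate_succ, List.cons_append, List.foldl_cons, bStep_concat]
    simp only [beq_self_eq_true, if_pos]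
    rw [ih acc (n + 1)]
    have : n + 1 + (k : Int) = n + ((k : Nat) + 1 : Nat) := by push_cast; ring
    rw [this]

theorem foldl_bStep_eq_rle :
    ∀ (fuel : Nat) (S : List String) (acc : List (String × Int)),
      S.length ≤ fuel →
      (∀ y n, acc.getLast? = some (y, n) → ∀ a, S.head? = some a → ¬ (a == y) = true) →
      List.foldl bStep acc S = acc ++ rle S := by
  intro fuel
  induction fuel with
  | zero =>
    intro S acc hf _
    have : S = [] := List.length_eq_zero_iff.mp (by omega)
    subst this
    simp [rle]
  | succ fuel ih =>
    intro S acc hf hhyp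
    cases S with
    | nil => simp [rle]
    | cons x xs =>
      have hstep : bStep acc x = acc ++ [(x, 1)] := by
        cases hl : acc.getLast? with
        | none =>
          have : acc = [] := List.getLast?_eq_none_iff.mp hl
          subst this
          simp [bStep]
        | some p =>
          obtain ⟨y, n⟩ := p
          have hxy : ¬ (x == y) = true := hhyp y n hl x rfl
          have hyx : (y == x) = false := by
            rw [beq_eq_false_iff_ne]
            intro he
            exact hxy (by simp [he])
          simp [bStep, hl, hyx]
      rw [List.foldl_cons, hstep]
      have hrle : rle (x :: xs)
          = (x, (1 : Int) + (xs.takeWhile (fun y => y == x)).length)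
            :: rle (xs.dropWhile (fun y => y == x)) := by rw [rle]
      have hsplit : xs = List.replicate ((xs.takeWhile (fun y => y == x)).length) x
          ++ xs.dropWhile (fun y => y == x) := by
        conv_lhs => rw [← List.takeWhile_append_dropWhile (p := fun y => y == x) (l := xs)]
        rw [← takeWhile_eq_replicate]
      rw [hrle]
      conv_lhs => rw [hsplit]
      rw [bStep_absorb]
      rw [ih (xs.dropWhile (fun y => y == x))
        (acc ++ [(x, (1 : Int) + ((xs.takeWhile (fun y => y == x)).length : Int))])
        (by have := List.length_dropWhile_le (fun y => y == x) xs; simp at hf; omega)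
        (by
          intro y n hl a ha
          rw [List.getLast?_concat] at hl
          simp only [Option.some.injEq, Prod.mk.injEq] at hl
          obtain ⟨hy, -⟩ := hl
          subst hy
          exact head?_dropWhile_ne x xs a ha)]
      simp

theorem proc_replicate (ml : Int) (x : String) (hx : (x == "H" || x == "E") = false) :
    ∀ (k : Nat) (r : List String), proc ml (List.replicate k x ++ r) = List.replicate k x ++ proc ml r := by
  intro k
  induction k with
  | zero => intro r; simp
  | succ k ih =>
    intro r
    rw [List.replicate_succ, List.cons_append, proc, if_neg (by simp [hx]), ih]
    simp

theorem rle_flatMap_eq_proc (ml : Int) :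
    ∀ (fuel : Nat) (S : List String), S.length ≤ fuel →
      (rle S).flatMap (bChunk ml) = proc ml S := by
  intro fuel
  induction fuel with
  | zero =>
    intro S hf
    have : S = [] := List.length_eq_zero_iff.mp (by omega)
    subst this
    simp [rle, proc]
  | succ fuel ih =>
    intro S hf
    cases S with
    | nil => simp [rle, proc]
    | cons x xs =>
      rw [rle, List.flatMap_cons, proc]
      set l := (xs.takeWhile (fun y => y == x)).length with hldef
      have htoNat : ((1 : Int) + (l : Int)).toNat = l + 1 := by omega
      have hih : (rle (xs.dropWhile (fun y => y == x))).flatMap (bChunk ml)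
          = proc ml (xs.dropWhile (fun y => y == x)) := by
        apply ih
        have := List.length_dropWhile_le (fun y => y == x) xs
        simp at hf
        omega
      have hsplit : xs = List.replicate l x ++ xs.dropWhile (fun y => y == x) := by
        conv_lhs => rw [← List.takeWhile_append_dropWhile (p := fun y => y == x) (l := xs)]
        rw [takeWhile_eq_replicate, ← hldef]
      rw [hih]
      by_cases hx : (x == "H" || x == "E") = true
      · rw [if_pos hx]
        by_cases hml : (1 + (l : Int)) < ml
        · rw [if_pos hml]
          have hchunk : bChunk ml (x, (1 : Int) + (l : Int)) = List.replicate (l + 1) "C" := by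
            simp [bChunk, hx, hml, htoNat]
          rw [hchunk, Nat.add_comm 1 l]
        · rw [if_neg hml]
          have hchunk : bChunk ml (x, (1 : Int) + (l : Int)) = List.replicate (l + 1) x := by
            simp [bChunk, hx, hml, htoNat]
          rw [hchunk]
          congr 1
          rw [takeWhile_eq_replicate, ← hldef, ← List.replicate_succ]
      · rw [if_neg hx]
        have hchunk : bChunk ml (x, (1 : Int) + (l : Int)) = List.replicate (l + 1) x := by
          simp [bChunk, hx, htoNat]
        rw [hchunk]
        conv_rhs => rw [hsplit]
        rw [proc_replicate ml x (by simpa using hx)]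
        rw [List.replicate_succ]
        simp

-- ===== VERDICT (by name: the statement is the Claim_ definition above) =====
theorem filter_short_structures_spec : Claim_equal_filter_short_structures := by
  intro S ml _
  unfold Spec_filter_short_structures filter_short_structures filter_short_structures_alt
  rw [loopA_eq ml S.length 0 S (by omega)]
  rw [foldl_bStep_eq_rle S.length S [] le_rfl (by simp)]
  rw [List.nil_append, PySem.List.foldl_append_eq_flatMap]
  rw [rle_flatMap_eq_proc ml S.length S le_rfl]
  simp
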